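-- pv_equiv track=rewrite | github.com/quytrungg/ygm-backend | apps/members/api/filters/contract.py | replace_approval_priority_field
-- ===== SOURCE A (Python) =====
-- def replace_approval_priority_field(ordering_fields) -> list[str]:
--     """Replace `approval_priority` field with its constituent fields."""
--     approval_priority_field = "approval_priority"
--     for idx, field in enumerate(ordering_fields):
--         if field == approval_priority_field:
--             return (
--                 ordering_fields[:idx]
--                 + ["-status_priority_for_approval", "signed_at"]
--                 + ordering_fields[idx + 1:]
--             )
--         if field == f"-{approval_priority_field}":
--             return (
--                 ordering_fields[:idx]
--                 + ["status_priority_for_approval", "-signed_at"]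
--                 + ordering_fields[idx + 1:]
--             )
--     return ordering_fields
-- ===== SOURCE B (Python) =====
-- def replace_approval_priority_field(ordering_fields) -> list[str]:
--     """Replace `approval_priority` field with its constituent fields."""
--     mapping = {
--         "approval_priority": ["-status_priority_for_approval", "signed_at"],
--         "-approval_priority": ["status_priority_for_approval", "-signed_at"],
--     }
--     result = []
--     replaced = False
--     for field in ordering_fields:
--         if not replaced and field in mapping:
--             result.extend(mapping[field])
--             replaced = True
--         else:
--             result.append(field)
--     return result
-- ===== Notes on version B (the rewrite author's own statement) =====
-- stated objective: alternative
-- what changed: Replaces A's enumerate-then-splice-by-index (find the token, rebuild from two slices) with a single accumulator pass over a token-to-fields mapping and a replaced flag, so no index or slicing is used.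
import Mathlib
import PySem

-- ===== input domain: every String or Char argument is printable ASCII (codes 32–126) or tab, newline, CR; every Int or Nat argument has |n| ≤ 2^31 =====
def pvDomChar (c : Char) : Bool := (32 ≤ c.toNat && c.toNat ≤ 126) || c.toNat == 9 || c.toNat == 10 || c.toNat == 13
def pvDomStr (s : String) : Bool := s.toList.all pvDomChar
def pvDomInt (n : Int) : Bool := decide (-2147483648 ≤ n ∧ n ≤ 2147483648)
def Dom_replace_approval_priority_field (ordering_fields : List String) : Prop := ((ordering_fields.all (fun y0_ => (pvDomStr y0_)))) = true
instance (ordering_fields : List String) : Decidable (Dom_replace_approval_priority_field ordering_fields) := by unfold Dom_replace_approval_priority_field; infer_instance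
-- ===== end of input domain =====

-- B builds the result in one accumulator pass over a token→fields mapping with a
-- 'replaced' flag, instead of A's enumerate + index-splice; alternative decomposition, same cost.


-- ===== PORT A =====
-- the enumerate loop: walk the (idx, field) pairs; on a match rebuild from slices of the full list
def rapfA_go (ordering_fields : List String) : List (Int × String) → List String
  | [] => ordering_fields
  | (idx, field) :: rest =>
    if field = "approval_priority" then
      PySem.List.slice ordering_fields none (some idx)
        ++ ["-status_priority_for_approval", "signed_at"]
        ++ PySem.List.slice ordering_fields (some (idx + 1)) none
    else if field = "-approval_priority" then
      PySem.List.slice ordering_fields none (some idx)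
        ++ ["status_priority_for_approval", "-signed_at"]
        ++ PySem.List.slice ordering_fields (some (idx + 1)) none
    else rapfA_go ordering_fields rest

def replace_approval_priority_field (ordering_fields : List String) : List String :=
  rapfA_go ordering_fields (PySem.List.enumerate ordering_fields 0)

-- ===== PORT B =====
def rapf_mapping (field : String) : Option (List String) :=
  if field = "approval_priority" then some ["-status_priority_for_approval", "signed_at"]
  else if field = "-approval_priority" then some ["status_priority_for_approval", "-signed_at"]
  else none

-- loop body: extend with the mapped fields on the first match, else append the field
def rapfB_step (st : Bool × List String) (field : String) : Bool × List String :=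
  if !st.1 then
    match rapf_mapping field with
    | some repl => (true, st.2 ++ repl)
    | none => (st.1, st.2 ++ [field])
  else (st.1, st.2 ++ [field])

def replace_approval_priority_field_alt (ordering_fields : List String) : List String :=
  (ordering_fields.foldl rapfB_step (false, [])).2

-- ===== PRECONDITION & SPEC =====
def Spec_replace_approval_priority_field (ordering_fields : List String) (out : List String) : Prop := out = replace_approval_priority_field_alt ordering_fields
instance (ordering_fields : List String) (out : List String) : Decidable (Spec_replace_approval_priority_field ordering_fields out) := by unfold Spec_replace_approval_priority_field; infer_instance

-- ===== CLAIM (what is proved, stated in full; the proofs are below) =====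
def Claim_equal_replace_approval_priority_field : Prop := ∀ (ordering_fields : List String), Dom_replace_approval_priority_field ordering_fields → Spec_replace_approval_priority_field ordering_fields (replace_approval_priority_field ordering_fields)

-- ===== LEMMAS AND PROOFS =====

-- common reference: replace the first matching token
def rapf_spec : List String → List String
  | [] => []
  | f :: rest =>
    match rapf_mapping f with
    | some repl => repl ++ rest
    | none => f :: rapf_spec rest

theorem rapfA_go_eq (suf pre : List String) :
    rapfA_go (pre ++ suf) (PySem.List.enumerate suf (pre.length : Int)) = pre ++ rapf_spec suf := by
  induction suf generalizing pre with
  | nil => simp [rapfA_go, rapf_spec]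
  | cons f rest ih =>
    rw [PySem.List.enumerate_cons]
    have htake : PySem.List.slice (pre ++ f :: rest) none (some (pre.length : Int)) = pre := by
      rw [PySem.List.slice_to_natCast]; simp
    have hdrop : PySem.List.slice (pre ++ f :: rest) (some ((pre.length : Int) + 1)) none = rest := by
      have h : (pre.length : Int) + 1 = ((pre.length + 1 : Nat) : Int) := by push_cast; ring
      rw [h, PySem.List.slice_from_natCast,
        show pre ++ f :: rest = (pre ++ [f]) ++ rest from by simp]
      exact List.drop_left' (by simp)
    by_cases h1 : f = "approval_priority"
    · subst h1
      simp [rapfA_go, rapf_spec, rapf_mapping, htake, hdrop]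
    · by_cases h2 : f = "-approval_priority"
      · subst h2
        simp [rapfA_go, rapf_spec, rapf_mapping, h1, htake, hdrop]
      · have h3 : (pre.length : Int) + 1 = (((pre ++ [f]).length : Nat) : Int) := by
          simp
        simp only [rapfA_go, if_neg h1, if_neg h2]
        rw [h3]
        have := ih (pre ++ [f])
        simp only [List.append_assoc, List.cons_append, List.nil_append] at this
        rw [this]
        simp [rapf_spec, rapf_mapping, h1, h2]

theorem rapfB_true (suf acc : List String) :
    suf.foldl rapfB_step (true, acc) = (true, acc ++ suf) := by
  induction suf generalizing acc with
  | nil => simp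
  | cons f rest ih =>
    rw [List.foldl_cons, show rapfB_step (true, acc) f = (true, acc ++ [f]) from by
      simp [rapfB_step], ih]
    simp

theorem rapfB_false (suf acc : List String) :
    (suf.foldl rapfB_step (false, acc)).2 = acc ++ rapf_spec suf := by
  induction suf generalizing acc with
  | nil => simp [rapf_spec]
  | cons f rest ih =>
    rw [List.foldl_cons]
    cases h : rapf_mapping f with
    | some repl =>
      rw [show rapfB_step (false, acc) f = (true, acc ++ repl) from by simp [rapfB_step, h],
        rapfB_true]
      simp [rapf_spec, h]
    | none =>
      rw [show rapfB_step (false, acc) f = (false, acc ++ [f]) from by simp [rapfB_step, h],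
        ih]
      simp [rapf_spec, h]

-- ===== VERDICT (by name: the statement is the Claim_ definition above) =====
theorem replace_approval_priority_field_spec : Claim_equal_replace_approval_priority_field := by
  intro l _
  unfold Spec_replace_approval_priority_field replace_approval_priority_field replace_approval_priority_field_alt
  have hA := rapfA_go_eq l []
  simp only [List.nil_append, List.length_nil, Nat.cast_zero] at hA
  rw [hA, rapfB_false]
  simp
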